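-- pv_equiv track=rewrite | github.com/Huaramo/vcHMM | vcHMM.py | update_insertions
-- ===== SOURCE A (Python) =====
-- def update_insertions(insertions):
--     """
--     Updates Startposition of insertions and returns new insertions.
--
--     Checks for insertions before the respective insertions to modify
--     the start position of the respective insertion.
--     This step is required to align the insertions with the modified
--     reference genome.
--
--     e.g. [200 2], 10 Insertions before -> [210 2]
--
--     :return: newsam
--     """
--     temp = 0
--     upd_inserts = {}
--     for insert in insertions.keys():
--         insert = [insert[0] + temp, insert[1], insertions[insert]]
--         temp += insert[1]
--         upd_inserts[(insert[0], insert[1])] = insert[2]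
--     return upd_inserts
-- ===== SOURCE B (Python) =====
-- def update_insertions(insertions):
--     # total of all insertion lengths; walk the keys BACK-TO-FRONT, peeling each
--     # length off the total to get that key's offset, then rebuild in order.
--     total = sum(k[1] for k in insertions)
--     pairs = []
--     for k in reversed(list(insertions)):
--         total -= k[1]
--         pairs.append(((k[0] + total, k[1]), insertions[k]))
--     pairs.reverse()
--     return dict(pairs)
-- ===== Notes on version B (the rewrite author's own statement) =====
-- stated objective: alternative
-- what changed: B sums all insertion lengths once, then walks the keys back-to-front, peeling each key's length off the running total to obtain its offset (a suffix-subtraction pass building the pair list in reverse), instead of A's forward loop threading a growing offset accumulator through the dict construction.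
import Mathlib
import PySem

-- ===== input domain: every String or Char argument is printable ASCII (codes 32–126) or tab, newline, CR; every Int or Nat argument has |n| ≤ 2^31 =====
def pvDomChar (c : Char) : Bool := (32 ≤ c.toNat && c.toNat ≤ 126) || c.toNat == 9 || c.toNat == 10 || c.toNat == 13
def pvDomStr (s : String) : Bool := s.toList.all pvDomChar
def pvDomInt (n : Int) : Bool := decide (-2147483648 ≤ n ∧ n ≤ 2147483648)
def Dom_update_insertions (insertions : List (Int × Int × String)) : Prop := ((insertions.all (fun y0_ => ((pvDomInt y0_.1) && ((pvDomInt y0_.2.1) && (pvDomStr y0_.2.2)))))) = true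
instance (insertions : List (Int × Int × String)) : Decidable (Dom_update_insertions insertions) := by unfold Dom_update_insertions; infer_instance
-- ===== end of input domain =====

-- B replaces A's forward loop threading a growing offset accumulator by a two-pass
-- scheme: sum all lengths first, then walk the keys back-to-front peeling each length
-- off the total to get its offset, building the pair list in reverse (alternative).

-- ===== PORT A =====
-- A's parameter is a dict keyed by (start, length); the assoc list is turned into the dict first.
def update_insertions (insertions : List (Int × Int × String)) : List (Int × Int × String) :=
  let d0 : PySem.Dict (Int × Int) String :=
    PySem.Dict.ofList (insertions.map (fun p => ((p.1, p.2.1), p.2.2)))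
  let st := d0.keys.foldl
    (fun (acc : Int × PySem.Dict (Int × Int) String) k =>
      -- insert = [insert[0] + temp, insert[1], insertions[insert]]
      let i0 := k.1 + acc.1
      let i1 := k.2
      let i2 := d0.getD k ""   -- k comes from d0.keys, so the Python lookup never raises
      (acc.1 + i1, acc.2.insert (i0, i1) i2))
    (0, PySem.Dict.empty)
  st.2.items.map (fun kv => (kv.1.1, kv.1.2, kv.2))

-- ===== PORT B =====
def update_insertions_alt (insertions : List (Int × Int × String)) : List (Int × Int × String) :=
  let d0 : PySem.Dict (Int × Int) String :=
    PySem.Dict.ofList (insertions.map (fun p => ((p.1, p.2.1), p.2.2)))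
  -- total = sum(k[1] for k in insertions)
  let total := d0.keys.foldl (fun s k => s + k.2) (0 : Int)
  -- for k in reversed(list(insertions)): total -= k[1]; pairs.append(...)
  let st := d0.keys.reverse.foldl
    (fun (acc : Int × List ((Int × Int) × String)) k =>
      (acc.1 - k.2, acc.2 ++ [((k.1 + (acc.1 - k.2), k.2), d0.getD k "")]))
    (total, ([] : List ((Int × Int) × String)))
  -- pairs.reverse(); return dict(pairs)
  let pairs := st.2.reverse
  (PySem.Dict.ofList pairs).items.map (fun kv => (kv.1.1, kv.1.2, kv.2))

-- ===== PRECONDITION & SPEC =====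
def Spec_update_insertions (insertions : List (Int × Int × String)) (out : List (Int × Int × String)) : Prop := out = update_insertions_alt insertions
instance (insertions : List (Int × Int × String)) (out : List (Int × Int × String)) : Decidable (Spec_update_insertions insertions out) := by unfold Spec_update_insertions; infer_instance

-- ===== CLAIM =====
def Claim_equal_update_insertions : Prop := ∀ (insertions : List (Int × Int × String)), Dom_update_insertions insertions → Spec_update_insertions insertions (update_insertions insertions)

-- ===== LEMMAS AND PROOFS =====

-- exclusive prefix sums of the lengths: exScan [a,b,…] t = [t, t+a.2, …]
def exScan : List (Int × Int) → Int → List Int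
  | [], _ => []
  | k :: ks, t => t :: exScan ks (t + k.2)

-- A's accumulator loop equals a fold over keys zipped with their exclusive prefix sums
theorem fold_equiv (g : (Int × Int) → String) (l : List (Int × Int)) :
    ∀ (t : Int) (d : PySem.Dict (Int × Int) String),
    (l.foldl
      (fun (acc : Int × PySem.Dict (Int × Int) String) k =>
        (acc.1 + k.2, acc.2.insert (k.1 + acc.1, k.2) (g k))) (t, d)).2
    = (l.zip (exScan l t)).foldl
        (fun (d : PySem.Dict (Int × Int) String) kw =>
          d.insert (kw.1.1 + kw.2, kw.1.2) (g kw.1)) d := by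
  induction l with
  | nil => intro t d; rfl
  | cons x xs ih =>
    intro t d
    simp only [List.foldl_cons, exScan, List.zip_cons_cons]
    rw [ih (t + x.2)]

-- sum of the second components
def sumL (l : List (Int × Int)) : Int := (l.map (·.2)).sum

theorem foldl_sumL (l : List (Int × Int)) : ∀ c : Int,
    l.foldl (fun s k => s + k.2) c = c + sumL l := by
  induction l with
  | nil => intro c; simp [sumL]
  | cons x xs ih => intro c; simp only [List.foldl_cons, sumL, List.map_cons, List.sum_cons]
                    rw [ih]; ring_nf; rfl

-- B's backward pass, starting from t + (sum of lengths), produces the reversed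
-- list of (shifted key, value) pairs with exclusive-prefix-sum offsets from t.
theorem back_pass (g : (Int × Int) → String) (l : List (Int × Int)) :
    ∀ (t : Int) (init : List ((Int × Int) × String)),
    l.reverse.foldl
      (fun (acc : Int × List ((Int × Int) × String)) k =>
        (acc.1 - k.2, acc.2 ++ [((k.1 + (acc.1 - k.2), k.2), g k)]))
      (t + sumL l, init)
    = (t, init ++ ((l.zip (exScan l t)).map
        (fun kw => ((kw.1.1 + kw.2, kw.1.2), g kw.1))).reverse) := by
  induction l with
  | nil => intro t init; simp [sumL]
  | cons x xs ih =>
    intro t init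
    simp only [List.reverse_cons, List.foldl_append, List.foldl_cons, List.foldl_nil,
      exScan, List.zip_cons_cons, List.map_cons, List.reverse_cons]
    have h1 : t + sumL (x :: xs) = (t + x.2) + sumL xs := by
      simp [sumL]; ring
    rw [h1, ih (t + x.2) init]
    have h2 : t + x.2 - x.2 = t := by ring
    rw [h2]
    simp

-- Dict.ofList is the insert fold
theorem ofList_eq_foldl (pairs : List ((Int × Int) × String)) :
    PySem.Dict.ofList pairs
      = pairs.foldl (fun d p => d.insert p.1 p.2) PySem.Dict.empty := rfl

-- ===== VERDICT =====
theorem update_insertions_spec : Claim_equal_update_insertions := by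
  intro insertions _
  show update_insertions insertions = update_insertions_alt insertions
  unfold update_insertions update_insertions_alt
  simp only []
  rw [fold_equiv, foldl_sumL, back_pass, List.reverse_append, List.reverse_reverse,
      List.reverse_nil, List.append_nil]
  simp only [ofList_eq_foldl, List.foldl_map]
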